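-- pv_equiv track=rewrite | github.com/ldy9037/python-algorithm | dev-matching/test2.py | solution
-- ===== SOURCE A (Python) =====
-- from collections import deque
--
-- def solution(n, horizontal):
--
--     answer = [] * n
--     # 배열 주소 참조 방지하기 위해 loop로 2차원 배열 생성
--     for i in range(n): answer.append([0] * n)
--
--     # 시작은 [0][0]으로 고정
--     answer[0][0] = 1
--
--     # BFS를 적용하기 위해 queue 생성
--     queue = deque()
--
--     # horizontal이라면 오른쪽으로 시작 아니라면 아래로 시작
--     if horizontal:queue.append((0, 1, True))
--     else: queue.append((1, 0, True))
--
--     # BFS에서 현재 순서를 체크하기 위해 order 변수 생성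
--     order = 1
--     while queue:
--         order += 1
--         # 큐에서 BFS 다음 정점을 꺼냄(방문), 정점 정보는 (row, col, 끝에 있는 정점인지)
--         x, y, end = queue.popleft()
--
--         # 만약 좌표가 배열을 벗어났다면 중지
--         if x >= n or y >= n: break
--
--         # 현재 좌표에 순번 지정
--         answer[x][y] = order
--
--         # 만약 현재 정점이 끝에 있는 정점이라면 (방향전환 하는 부분이라면)
--         if end:
--             # 방향 전환 후 시작 좌표 초기화
--             n_x = 0
--             n_y = 0
--
--             # 현재 정점이 위에 존재한다면(다음 방향은 아래)
--             if x == 0: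
--
--                 # 다음 시작 좌표의 col은 현재 col (아래로 이동하므로)
--                 n_y = y
--
--                 # 다음 끝점까지는 현재 col의 두배 만큼 이동해야함
--                 for i in range(y * 2):
--                     # row를 한칸 씩 늘리면서 방문 예약(Enqueue)
--                     if n_x < y:
--                         n_x += 1
--                         queue.append((n_x, y, False))
--                     # 한칸씩 늘리다가 row와 col이 같아지는 시점에서부터 col을 한칸씩 줄여가면서 방문 예약
--                     else:
--                         n_y -= 1
--                         queue.append((n_x ,n_y, False))
--                 # 해당 라인을 전부 방문 예약 했으므로 다음 라인으로 이동(방문) 예약 (아래로 이동/ 방향전환 준비)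
--                 queue.append((n_x + 1 ,n_y, True))
--
--             # 현재 정점이 왼쪽에 존재한다면 (다음 방향을 오른쪽)
--             if y == 0:
--
--                 # 다음 시작 좌표의 row는 현재 row (오른쪽으로 이동하므로)
--                 n_x = x
--
--                 # 마찬가지로 다음 끝점까지 이동횟수는 현재 row의 두배
--                 for i in range(x * 2):
--                     # col을 한칸 씩 늘리면서 방문 예약(Enqueue)
--                     if n_y < x:
--                         n_y += 1
--                         queue.append((x, n_y, False))
--                     # 한칸씩 늘리다가 row와 col이 같아지는 시점에서부터 row를 한칸씩 줄여가면서 방문 예약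
--                     else:
--                         n_x -= 1
--                         queue.append((n_x, n_y, False))
--                 # 해당 라인을 전부 방문 예약 했으므로 다음 라인으로 이동(방문) 예약 (오른쪽 이동/ 방향전환 준비)
--                 queue.append((n_x ,n_y + 1, True))
--
--     return answer
-- ===== SOURCE B (Python) =====
-- def solution(n, horizontal):
--     g = [[0] * n for _ in range(n)]
--     g[0][0] = 1
--     order = 2
--     for k in range(1, n):
--         if k % 2 == 1:
--             cells = [(i, k) for i in range(k + 1)] + [(k, j) for j in range(k - 1, -1, -1)]
--         else:
--             cells = [(k, j) for j in range(k + 1)] + [(i, k) for i in range(k - 1, -1, -1)]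
--         for i, j in cells:
--             if horizontal:
--                 g[i][j] = order
--             else:
--                 g[j][i] = order
--             order += 1
--     return g
-- ===== Notes on version B (the rewrite author's own statement) =====
-- stated objective: simpler
-- what changed: Replaced the BFS queue simulation (deque of (row,col,is-end) vertices with direction-turn re-enqueueing) by a direct per-shell enumeration: for each k the L-shaped layer max(row,col)=k is listed explicitly and filled with consecutive numbers from a running counter, transposing indices when horizontal is False; no queue exists.
import Mathlib
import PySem

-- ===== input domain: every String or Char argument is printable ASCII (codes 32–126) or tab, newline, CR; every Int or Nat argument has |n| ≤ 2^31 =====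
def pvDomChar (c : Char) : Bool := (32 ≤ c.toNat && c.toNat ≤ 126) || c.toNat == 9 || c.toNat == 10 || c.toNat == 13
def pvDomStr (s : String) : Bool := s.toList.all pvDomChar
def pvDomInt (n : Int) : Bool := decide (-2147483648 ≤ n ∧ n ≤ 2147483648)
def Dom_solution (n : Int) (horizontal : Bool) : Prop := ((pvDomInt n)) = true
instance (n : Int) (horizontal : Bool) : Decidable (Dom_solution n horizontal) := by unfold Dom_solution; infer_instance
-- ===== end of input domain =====

-- B replaces A's BFS queue simulation by a direct per-shell (L-shaped layer) fill with a running counter; same O(n^2) cost.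


-- ===== PORT A =====
-- answer[x][y] = v  (total form of Python's two-level indexed assignment; in range under Pre_)
def set2 (g : List (List Int)) (x y v : Int) : List (List Int) :=
  PySem.List.pySetD g x (PySem.List.pySetD (PySem.List.pyGetD g x []) y v)

-- body of 'for i in range(y * 2)' in the 'x == 0' branch: state (n_x, n_y, queue)
def stepX (y : Int) (t : Int × Int × List (Int × Int × Bool)) : Int × Int × List (Int × Int × Bool) :=
  if t.1 < y then (t.1 + 1, t.2.1, t.2.2 ++ [(t.1 + 1, y, false)])
  else (t.1, t.2.1 - 1, t.2.2 ++ [(t.1, t.2.1 - 1, false)])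

-- body of 'for i in range(x * 2)' in the 'y == 0' branch
def stepY (x : Int) (t : Int × Int × List (Int × Int × Bool)) : Int × Int × List (Int × Int × Bool) :=
  if t.2.1 < x then (t.1, t.2.1 + 1, t.2.2 ++ [(x, t.2.1 + 1, false)])
  else (t.1 - 1, t.2.1, t.2.2 ++ [(t.1 - 1, t.2.1, false)])

-- the 'while queue:' loop; fuel only makes it total (it is never exhausted under Pre_)
def bfsA (n : Int) : Nat → List (Int × Int × Bool) → List (List Int) → Int → List (List Int)
  | _, [], g, _ => g
  | 0, _ :: _, g, _ => g
  | fuel + 1, (x, y, e) :: rest, g, order =>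
      let order := order + 1
      if x ≥ n ∨ y ≥ n then g
      else
        let g := set2 g x y order
        if e then
          let s : Int × Int × List (Int × Int × Bool) := (0, 0, rest)
          let s :=
            if x == 0 then
              let s1 := (PySem.List.pyRange 0 (y * 2) 1).foldl (fun t _ => stepX y t) (s.1, y, s.2.2)
              (s1.1, s1.2.1, s1.2.2 ++ [(s1.1 + 1, s1.2.1, true)])
            else s
          let s :=
            if y == 0 then
              let s2 := (PySem.List.pyRange 0 (x * 2) 1).foldl (fun t _ => stepY x t) (x, s.2.1, s.2.2)
              (s2.1, s2.2.1, s2.2.2 ++ [(s2.1, s2.2.1 + 1, true)])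
            else s
          bfsA n fuel s.2.2 g order
        else bfsA n fuel rest g order

def solution (n : Int) (horizontal : Bool) : List (List Int) :=
  let answer : List (List Int) := PySem.List.pyRepeat [] n
  let answer := (PySem.List.pyRange 0 n 1).foldl (fun acc _ => acc ++ [PySem.List.pyRepeat [(0 : Int)] n]) answer
  let answer := set2 answer 0 0 1
  let queue : List (Int × Int × Bool) := if horizontal then [(0, 1, true)] else [(1, 0, true)]
  bfsA n (n.toNat * n.toNat + 1) queue answer 1

-- ===== PORT B =====
-- g[i][j] = v  (B's own copy of the two-level indexed assignment; in range under Pre_)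
def set2B (g : List (List Int)) (x y v : Int) : List (List Int) :=
  PySem.List.pySetD g x (PySem.List.pySetD (PySem.List.pyGetD g x []) y v)

def cellsB (k : Int) : List (Int × Int) :=
  if PySem.Int.mod k 2 == 1 then
    (PySem.List.pyRange 0 (k + 1) 1).map (fun i => (i, k)) ++
    (PySem.List.pyRange (k - 1) (-1) (-1)).map (fun j => (k, j))
  else
    (PySem.List.pyRange 0 (k + 1) 1).map (fun j => (k, j)) ++
    (PySem.List.pyRange (k - 1) (-1) (-1)).map (fun i => (i, k))

def solution_alt (n : Int) (horizontal : Bool) : List (List Int) :=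
  let g : List (List Int) := (PySem.List.pyRange 0 n 1).map (fun _ => PySem.List.pyRepeat [(0 : Int)] n)
  let g := set2B g 0 0 1
  let s := (PySem.List.pyRange 1 n 1).foldl
    (fun (s : List (List Int) × Int) k =>
      (cellsB k).foldl
        (fun (t : List (List Int) × Int) c =>
          (if horizontal then set2B t.1 c.1 c.2 t.2 else set2B t.1 c.2 c.1 t.2, t.2 + 1))
        s)
    (g, 2)
  s.1

-- ===== PRECONDITION & SPEC =====
-- Pre_ excludes n ≤ 0, on which Python A raises IndexError at 'answer[0][0] = 1' (B raises the same way).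
def Pre_solution (n : Int) (horizontal : Bool) : Prop := 1 ≤ n
instance (n : Int) (horizontal : Bool) : Decidable (Pre_solution n horizontal) := by unfold Pre_solution; infer_instance
def pvWitness_solution : Int × Bool := (3, true)

def Spec_solution (n : Int) (horizontal : Bool) (out : List (List Int)) : Prop := out = solution_alt n horizontal
instance (n : Int) (horizontal : Bool) (out : List (List Int)) : Decidable (Spec_solution n horizontal out) := by unfold Spec_solution; infer_instance

-- ===== CLAIM (what is proved, stated in full; the proofs are below) =====
def Claim_equal_solution : Prop := ∀ (n : Int) (horizontal : Bool), Dom_solution n horizontal → Pre_solution n horizontal → Spec_solution n horizontal (solution n horizontal)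

-- ===== LEMMAS AND PROOFS =====

-- the tail of layer k, x==0 orientation: down the column, then left along the row
def tailX (k : Int) : List (Int × Int) :=
  (PySem.List.pyRange 1 (k + 1) 1).map (fun i => (i, k)) ++
  (PySem.List.pyRange (k - 1) (-1) (-1)).map (fun j => (k, j))

-- the tail of layer k, y==0 orientation (the transpose of tailX)
def tailY (k : Int) : List (Int × Int) :=
  (PySem.List.pyRange 1 (k + 1) 1).map (fun j => (k, j)) ++
  (PySem.List.pyRange (k - 1) (-1) (-1)).map (fun i => (i, k))

def headC (h : Bool) (k : Int) : Int × Int :=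
  if (PySem.Int.mod k 2 == 1) == h then (0, k) else (k, 0)

def tailC (h : Bool) (k : Int) : List (Int × Int) :=
  if (PySem.Int.mod k 2 == 1) == h then tailX k else tailY k

-- layer k in the orientation actually written into the grid
def oCells (h : Bool) (k : Int) : List (Int × Int) :=
  if h then cellsB k else (cellsB k).map (fun c => (c.2, c.1))

def assignL (cells : List (Int × Int)) (s : List (List Int) × Int) : List (List Int) × Int :=
  cells.foldl (fun t c => (set2 t.1 c.1 c.2 t.2, t.2 + 1)) s

def mkF (c : Int × Int) : Int × Int × Bool := (c.1, c.2, false)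

-- fuel consumed from the start of layer k until the loop breaks, j = n - k layers remaining
def needed (h : Bool) : Nat → Int → Nat
  | 0, _ => 1
  | j + 1, k => 1 + (tailC h k).length + needed h j (k + 1)

lemma foldl_const_step {α β : Type} (f : α → α) (l : List β) (s : α) :
    l.foldl (fun t _ => f t) s = f^[l.length] s := by
  induction l generalizing s with
  | nil => rfl
  | cons x xs ih => simpa [Function.iterate_succ_apply] using ih (f s)

lemma pyRange_neg_one_succ_right (a b : Int) (h : b ≤ a) :
    PySem.List.pyRange a (b - 1) (-1) = PySem.List.pyRange a b (-1) ++ [b] := by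
  rw [PySem.List.pyRange_neg_one, PySem.List.pyRange_neg_one]
  have h1 : (a - (b - 1)).toNat = (a - b).toNat + 1 := by omega
  rw [h1, List.range_succ, List.map_append]
  simp
  omega

lemma stepX_iter_asc (y : Int) (q : List (Int × Int × Bool)) (m : Nat) (hm : (m : Int) ≤ y) :
    (stepX y)^[m] (0, y, q) = ((m : Int), y, q ++ ((PySem.List.pyRange 1 ((m : Int) + 1) 1).map (fun i => (i, y, false)))) := by
  induction m with
  | zero => simp [PySem.List.pyRange_one_eq_nil]
  | succ m ih =>
    rw [Function.iterate_succ_apply', ih (by push_cast at hm ⊢; omega)]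
    have hlt : (m : Int) < y := by push_cast at hm ⊢; omega
    simp only [stepX, if_pos hlt]
    push_cast
    rw [PySem.List.pyRange_one_succ_right (by omega : (1 : Int) ≤ (m : Int) + 1), List.map_append]
    simp

lemma stepX_iter_desc (y : Int) (q : List (Int × Int × Bool)) (m : Nat) (hm : (m : Int) ≤ y) :
    (stepX y)^[m] (y, y, q) = (y, y - (m : Int), q ++ ((PySem.List.pyRange (y - 1) (y - 1 - (m : Int)) (-1)).map (fun j => (y, j, false)))) := by
  induction m with
  | zero => simp [PySem.List.pyRange_neg_one_eq_nil]
  | succ m ih =>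
    rw [Function.iterate_succ_apply', ih (by push_cast at hm ⊢; omega)]
    have hnlt : ¬ (y < y) := lt_irrefl y
    simp only [stepX, if_neg hnlt]
    push_cast
    rw [show y - 1 - ((m : Int) + 1) = (y - 1 - (m : Int)) - 1 from by ring,
        pyRange_neg_one_succ_right _ _ (by omega : y - 1 - (m : Int) ≤ y - 1), List.map_append]
    simp
    omega

lemma stepY_iter_asc (x : Int) (q : List (Int × Int × Bool)) (m : Nat) (hm : (m : Int) ≤ x) :
    (stepY x)^[m] (x, 0, q) = (x, (m : Int), q ++ ((PySem.List.pyRange 1 ((m : Int) + 1) 1).map (fun j => (x, j, false)))) := by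
  induction m with
  | zero => simp [PySem.List.pyRange_one_eq_nil]
  | succ m ih =>
    rw [Function.iterate_succ_apply', ih (by push_cast at hm ⊢; omega)]
    have hlt : (m : Int) < x := by push_cast at hm ⊢; omega
    simp only [stepY, if_pos hlt]
    push_cast
    rw [PySem.List.pyRange_one_succ_right (by omega : (1 : Int) ≤ (m : Int) + 1), List.map_append]
    simp

lemma stepY_iter_desc (x : Int) (q : List (Int × Int × Bool)) (m : Nat) (hm : (m : Int) ≤ x) :
    (stepY x)^[m] (x, x, q) = (x - (m : Int), x, q ++ ((PySem.List.pyRange (x - 1) (x - 1 - (m : Int)) (-1)).map (fun i => (i, x, false)))) := by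
  induction m with
  | zero => simp [PySem.List.pyRange_neg_one_eq_nil]
  | succ m ih =>
    rw [Function.iterate_succ_apply', ih (by push_cast at hm ⊢; omega)]
    have hnlt : ¬ (x < x) := lt_irrefl x
    simp only [stepY, if_neg hnlt]
    push_cast
    rw [show x - 1 - ((m : Int) + 1) = (x - 1 - (m : Int)) - 1 from by ring,
        pyRange_neg_one_succ_right _ _ (by omega : x - 1 - (m : Int) ≤ x - 1), List.map_append]
    simp
    omega

-- one head step, x==0 orientation
lemma headX_step (n k : Int) (hk : 1 ≤ k) (hkn : k < n) (fuel : Nat)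
    (rest : List (Int × Int × Bool)) (g : List (List Int)) (order : Int) :
    bfsA n (fuel + 1) ((0, k, true) :: rest) g order =
    bfsA n fuel (rest ++ (tailX k).map mkF ++ [(k + 1, 0, true)]) (set2 g 0 k (order + 1)) (order + 1) := by
  have hk0 : ¬ ((0 : Int) ≥ n ∨ k ≥ n) := by omega
  have hkne : ((k : Int) == 0) = false := by simp; omega
  have hcast : ((k.toNat : Int)) = k := by omega
  simp only [bfsA]
  rw [if_neg hk0]
  simp only [beq_self_eq_true, if_true, hkne, if_false, Bool.false_eq_true]
  rw [foldl_const_step]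
  have hlen : (PySem.List.pyRange 0 (k * 2) 1).length = k.toNat + k.toNat := by
    rw [PySem.List.length_pyRange_one]; omega
  rw [hlen, Function.iterate_add_apply,
      stepX_iter_asc k rest k.toNat (by omega), hcast,
      stepX_iter_desc k _ k.toNat (by omega), hcast]
  rw [show k - k = (0 : Int) from by ring, show k - 1 - k = (-1 : Int) from by ring]
  simp [tailX, List.map_append, List.map_map, Function.comp_def, mkF]

lemma headY_step (n k : Int) (hk : 1 ≤ k) (hkn : k < n) (fuel : Nat)
    (rest : List (Int × Int × Bool)) (g : List (List Int)) (order : Int) :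
    bfsA n (fuel + 1) ((k, 0, true) :: rest) g order =
    bfsA n fuel (rest ++ (tailY k).map mkF ++ [(0, k + 1, true)]) (set2 g k 0 (order + 1)) (order + 1) := by
  have hk0 : ¬ ((k : Int) ≥ n ∨ (0 : Int) ≥ n) := by omega
  have hkne : ((k : Int) == 0) = false := by simp; omega
  have hcast : ((k.toNat : Int)) = k := by omega
  simp only [bfsA]
  rw [if_neg hk0]
  simp only [beq_self_eq_true, if_true, hkne, if_false, Bool.false_eq_true]
  rw [foldl_const_step]
  have hlen : (PySem.List.pyRange 0 (k * 2) 1).length = k.toNat + k.toNat := by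
    rw [PySem.List.length_pyRange_one]; omega
  rw [hlen, Function.iterate_add_apply,
      stepY_iter_asc k rest k.toNat (by omega), hcast,
      stepY_iter_desc k _ k.toNat (by omega), hcast]
  rw [show k - k = (0 : Int) from by ring, show k - 1 - k = (-1 : Int) from by ring]
  simp [tailY, List.map_append, List.map_map, Function.comp_def, mkF]

lemma break_step (n x y : Int) (hbr : x ≥ n ∨ y ≥ n) (fuel : Nat) (e : Bool)
    (rest : List (Int × Int × Bool)) (g : List (List Int)) (order : Int) :
    bfsA n (fuel + 1) ((x, y, e) :: rest) g order = g := by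
  simp only [bfsA]
  rw [if_pos hbr]

lemma falses_steps (n : Int) : ∀ (cells : List (Int × Int)),
    (∀ c ∈ cells, c.1 < n ∧ c.2 < n) → ∀ (fuel : Nat)
    (q : List (Int × Int × Bool)) (g : List (List Int)) (order : Int),
    bfsA n (cells.length + fuel) (cells.map mkF ++ q) g order =
    bfsA n fuel q (assignL cells (g, order + 1)).1 (order + cells.length) := by
  intro cells
  induction cells with
  | nil => intro _ fuel q g order; simp [assignL]
  | cons c cs ih =>
    intro hb fuel q g order
    obtain ⟨hc1, hc2⟩ := hb c (List.mem_cons_self ..)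
    rw [show (c :: cs).length + fuel = (cs.length + fuel) + 1 from by simp [List.length_cons]; omega]
    simp only [List.map_cons, List.cons_append, mkF, bfsA]
    rw [if_neg (by omega : ¬ (c.1 ≥ n ∨ c.2 ≥ n))]
    simp only [Bool.false_eq_true, if_false]
    rw [ih (fun c' h' => hb c' (List.mem_cons_of_mem _ h')) fuel q _ (order + 1)]
    simp only [assignL, List.foldl_cons, List.length_cons]
    congr 1
    push_cast
    ring

lemma assignL_snd (cells : List (Int × Int)) (g : List (List Int)) (w : Int) :
    (assignL cells (g, w)).2 = w + cells.length := by
  induction cells generalizing g w with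
  | nil => simp [assignL]
  | cons c cs ih =>
    simp only [assignL, List.foldl_cons] at *
    rw [ih]
    simp only [List.length_cons]
    push_cast
    ring

lemma mod2_flip (k : Int) (hk : 0 ≤ k) :
    ((PySem.Int.mod (k + 1) 2 == 1) : Bool) = !(PySem.Int.mod k 2 == 1) := by
  rw [PySem.Int.mod_eq_emod_of_pos (by norm_num : (0:Int) < 2), PySem.Int.mod_eq_emod_of_pos (by norm_num : (0:Int) < 2)]
  rcases Int.emod_two_eq_zero_or_one k with h | h
  · have : (k + 1) % 2 = 1 := by omega
    simp [h, this]
  · have : (k + 1) % 2 = 0 := by omega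
    simp [h, this]

lemma oCells_decomp (h : Bool) (k : Int) (hk : 1 ≤ k) :
    oCells h k = headC h k :: tailC h k := by
  have h0 : (0 : Int) < k + 1 := by omega
  have hr : PySem.List.pyRange 0 (k + 1) 1 = 0 :: PySem.List.pyRange 1 (k + 1) 1 :=
    PySem.List.pyRange_one_cons h0
  cases h <;> cases hb : (PySem.Int.mod k 2 == 1) <;>
    simp only [oCells, cellsB, headC, tailC, tailX, tailY, hb, hr, Bool.beq_self_left,
               if_true, if_false, Bool.false_eq_true, Bool.true_eq_false, beq_self_eq_true,
               beq_false, beq_true, Bool.not_true, Bool.not_false, cond_true, cond_false,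
               List.map_cons, List.map_append, List.map_map, Function.comp] <;> rfl

lemma tailC_length (h : Bool) (k : Int) (hk : 0 ≤ k) :
    ((tailC h k).length : Int) = 2 * k := by
  have h1 : (PySem.List.pyRange 1 (k + 1) 1).length = k.toNat := by
    rw [PySem.List.length_pyRange_one]; omega
  have h2 : (PySem.List.pyRange (k - 1) (-1) (-1)).length = k.toNat := by
    rw [PySem.List.length_pyRange_neg_one]; omega
  unfold tailC tailX tailY
  split <;> simp only [List.length_append, List.length_map, h1, h2] <;> omega

lemma tail_bounds (n : Int) (h : Bool) (k : Int) (hk : 1 ≤ k) (hkn : k < n) :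
    ∀ c ∈ tailC h k, c.1 < n ∧ c.2 < n := by
  intro c hc
  unfold tailC tailX tailY at hc
  split at hc <;>
  · simp only [List.mem_append, List.mem_map] at hc
    rcases hc with ⟨i, hi, rfl⟩ | ⟨j, hj, rfl⟩
    · rw [PySem.List.mem_pyRange_one] at hi
      exact ⟨by simp; omega, by simp; omega⟩
    · rw [PySem.List.mem_pyRange_neg_one] at hj
      exact ⟨by simp; omega, by simp; omega⟩

-- one full layer (head + its tail), leaving the next layer's head in the queue
lemma layer_step (n : Int) (h : Bool) (k : Int) (hk : 1 ≤ k) (hkn : k < n) (fuel : Nat)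
    (g : List (List Int)) (order : Int) :
    bfsA n (1 + (tailC h k).length + fuel) [((headC h k).1, (headC h k).2, true)] g order =
    bfsA n fuel [((headC h (k + 1)).1, (headC h (k + 1)).2, true)]
      (assignL (oCells h k) (g, order + 1)).1 (order + 1 + (tailC h k).length) := by
  have hflip := mod2_flip k (by omega)
  cases hbc : ((PySem.Int.mod k 2 == 1) == h) with
  | true =>
    have h1 : (PySem.Int.mod k 2 == 1) = h := eq_of_beq hbc
    have hHead : headC h k = (0, k) := by rw [headC, if_pos hbc]
    have hTail : tailC h k = tailX k := by rw [tailC, if_pos hbc]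
    have hHead' : headC h (k + 1) = (k + 1, 0) := by
      rw [headC, hflip, h1, if_neg (by simp)]
    simp only [hHead, hTail, hHead']
    rw [show 1 + (tailX k).length + fuel = ((tailX k).length + fuel) + 1 from by omega,
        headX_step n k hk hkn, List.nil_append,
        falses_steps n (tailX k) (by
          have := tail_bounds n h k hk hkn; rw [hTail] at this; exact this)
          fuel [(k + 1, 0, true)] _ (order + 1),
        oCells_decomp h k hk, hHead, hTail]
    simp only [assignL, List.foldl_cons]
  | false =>
    have h1 : (PySem.Int.mod k 2 == 1) = !h := Bool.eq_not_of_ne (ne_of_beq_false hbc)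
    have hHead : headC h k = (k, 0) := by rw [headC, if_neg (by rw [hbc]; simp)]
    have hTail : tailC h k = tailY k := by rw [tailC, if_neg (by rw [hbc]; simp)]
    have hHead' : headC h (k + 1) = (0, k + 1) := by
      rw [headC, hflip, h1, if_pos (by simp)]
    simp only [hHead, hTail, hHead']
    rw [show 1 + (tailY k).length + fuel = ((tailY k).length + fuel) + 1 from by omega,
        headY_step n k hk hkn, List.nil_append,
        falses_steps n (tailY k) (by
          have := tail_bounds n h k hk hkn; rw [hTail] at this; exact this)
          fuel [(0, k + 1, true)] _ (order + 1),
        oCells_decomp h k hk, hHead, hTail]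
    simp only [assignL, List.foldl_cons]

lemma layerB_eq (h : Bool) (k : Int) (s : List (List Int) × Int) :
    (cellsB k).foldl
      (fun (t : List (List Int) × Int) c =>
        (if h then set2B t.1 c.1 c.2 t.2 else set2B t.1 c.2 c.1 t.2, t.2 + 1)) s =
    assignL (oCells h k) s := by
  have hBA : set2B = set2 := rfl
  cases h with
  | true => simp [assignL, oCells, hBA]
  | false =>
    simp only [oCells, Bool.false_eq_true, if_false, assignL, List.foldl_map, hBA]

lemma main_loop (n : Int) (h : Bool) :
    ∀ (j : Nat) (k : Int), 1 ≤ k → k + (j : Int) = n →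
    ∀ (g : List (List Int)) (order : Int) (fuel : Nat), needed h j k ≤ fuel →
    bfsA n fuel [((headC h k).1, (headC h k).2, true)] g order =
    ((PySem.List.pyRange k n 1).foldl
      (fun (s : List (List Int) × Int) k' =>
        (cellsB k').foldl
          (fun (t : List (List Int) × Int) c =>
            (if h then set2B t.1 c.1 c.2 t.2 else set2B t.1 c.2 c.1 t.2, t.2 + 1)) s)
      (g, order + 1)).1 := by
  intro j
  induction j with
  | zero =>
    intro k hk hkn g order fuel hfuel
    have hkn' : k = n := by push_cast at hkn; omega
    subst hkn'
    obtain ⟨f, rfl⟩ : ∃ f, fuel = f + 1 := ⟨fuel - 1, by simp [needed] at hfuel; omega⟩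
    rw [PySem.List.pyRange_one_eq_nil (le_refl k)]
    simp only [List.foldl_nil]
    unfold headC
    split
    · exact break_step k 0 k (by omega) f true [] g order
    · exact break_step k k 0 (by omega) f true [] g order
  | succ j ih =>
    intro k hk hkn g order fuel hfuel
    have hkn' : k < n := by push_cast at hkn; omega
    obtain ⟨f, rfl⟩ : ∃ f, fuel = 1 + (tailC h k).length + f :=
      ⟨fuel - (1 + (tailC h k).length), by simp [needed] at hfuel; omega⟩
    simp only [needed] at hfuel
    rw [layer_step n h k hk hkn' f g order,
        ih (k + 1) (by omega) (by push_cast at hkn ⊢; omega) _ _ f (by omega),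
        PySem.List.pyRange_one_cons hkn']
    simp only [List.foldl_cons]
    rw [layerB_eq h k (g, order + 1)]
    have h2 : (assignL (oCells h k) (g, order + 1)).2 = order + 1 + ((tailC h k).length : Int) + 1 := by
      rw [assignL_snd, oCells_decomp h k hk]
      simp only [List.length_cons]
      push_cast
      ring
    rw [show assignL (oCells h k) (g, order + 1) =
        ((assignL (oCells h k) (g, order + 1)).1, order + 1 + ((tailC h k).length : Int) + 1) from by
      rw [← h2]]

lemma needed_eq (h : Bool) : ∀ (j : Nat) (k : Int), 0 ≤ k →
    needed h j k = 2 * j * k.toNat + j * j + 1 := by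
  intro j
  induction j with
  | zero => intro k hk; simp [needed]
  | succ j ih =>
    intro k hk
    have hlen : (tailC h k).length = 2 * k.toNat := by
      have := tailC_length h k hk
      omega
    have hk1 : (k + 1).toNat = k.toNat + 1 := by omega
    simp only [needed, hlen, ih (k + 1) (by omega), hk1]
    ring

-- ===== VERDICT (by name: the statement is the Claim_ definition above) =====
theorem solution_spec : Claim_equal_solution := by
  intro n h hdom hpre
  have hn : (1 : Int) ≤ n := hpre
  unfold Spec_solution
  have hg0 : PySem.List.pyRepeat ([] : List (List Int)) n = [] := by
    simp [PySem.List.pyRepeat]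
  have hfuel : needed h (n - 1).toNat 1 ≤ n.toNat * n.toNat + 1 := by
    rw [needed_eq h (n - 1).toNat 1 (by norm_num)]
    have hh : n.toNat = (n - 1).toNat + 1 := by omega
    have hsq : ((n - 1).toNat + 1) * ((n - 1).toNat + 1) =
        (n - 1).toNat * (n - 1).toNat + 2 * (n - 1).toNat + 1 := by ring
    rw [hh, show (1 : Int).toNat = 1 from rfl]
    simp only [Nat.mul_one]
    omega
  have happ := main_loop n h (n - 1).toNat 1 (by norm_num) (by omega)
    (set2 ((PySem.List.pyRange 0 n 1).map (fun _ => PySem.List.pyRepeat [(0 : Int)] n)) 0 0 1)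
    1 (n.toNat * n.toNat + 1) hfuel
  have hq : [((headC h 1).1, (headC h 1).2, true)] =
      if h then [((0 : Int), (1 : Int), true)] else [((1 : Int), (0 : Int), true)] := by
    cases h <;> rfl
  rw [hq] at happ
  simp only [solution, solution_alt, hg0, PySem.List.foldl_append_singleton_eq_map,
             List.nil_append]
  norm_num at happ ⊢
  exact happ
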